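-- pv_equiv track=rewrite | github.com/kimyenac/Algorithm | 프로그래머스/unrated/181864. 문자열 바꿔서 찾기/문자열 바꿔서 찾기.py | solution
-- ===== SOURCE A (Python) =====
-- def solution(myString, pat):
--     answer = ''
--
--     for x in myString:
--         if x == 'A':
--             answer += 'B'
--         else:
--             answer += 'A'
--
--     for i in range(len(answer) - len(pat) + 1):
--         if answer[i:len(pat)+i] == pat:
--             return 1
--
--     return 0
-- ===== SOURCE B (Python) =====
-- def solution(myString, pat):
--     # Bitap (shift-and): bit j of `state` is set iff pat[:j+1] is a suffix of the
--     # A/B-swapped text read so far; no swapped string is ever materialised.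
--     m = len(pat)
--     if m == 0:
--         return 1
--     maskA = 0  # bits j where pat[j] == 'A'
--     maskB = 0  # bits j where pat[j] == 'B'
--     bit = 1
--     for pc in pat:
--         if pc == 'A':
--             maskA |= bit
--         elif pc == 'B':
--             maskB |= bit
--         bit <<= 1
--     goal = 1 << (m - 1)
--     state = 0
--     for c in myString:
--         state = ((state << 1) | 1) & (maskB if c == 'A' else maskA)
--         if state & goal:
--             return 1
--     return 0
-- ===== Notes on version B (the rewrite author's own statement) =====
-- stated objective: alternative
-- what changed: Replaces A's build-a-swapped-string-then-compare-a-slice-at-every-index search by the Bitap (shift-and) algorithm: precomputed per-character pattern bitmasks and one bit-parallel pass over the original string, never materialising the swapped string.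
import Mathlib
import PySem

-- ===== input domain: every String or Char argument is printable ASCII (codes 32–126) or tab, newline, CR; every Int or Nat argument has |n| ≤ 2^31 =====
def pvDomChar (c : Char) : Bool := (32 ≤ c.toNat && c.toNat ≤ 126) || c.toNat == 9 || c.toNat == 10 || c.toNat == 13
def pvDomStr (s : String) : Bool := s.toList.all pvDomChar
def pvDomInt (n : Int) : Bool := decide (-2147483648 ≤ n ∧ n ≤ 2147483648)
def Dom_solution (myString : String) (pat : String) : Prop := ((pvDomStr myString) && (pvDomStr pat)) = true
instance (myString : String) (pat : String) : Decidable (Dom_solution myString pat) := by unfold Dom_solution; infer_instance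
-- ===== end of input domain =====

-- B replaces A's swapped-string build + slice-comparison-at-every-index search by the Bitap
-- (shift-and) bit-parallel search: one pass over the original string, no swapped string built.

-- ===== PORT A =====
-- the 'for i in range(...): if answer[i:len(pat)+i] == pat: return 1' loop, early return as recursion
def aScan (answer pat : List Char) : List Int → Int
  | [] => 0
  | i :: rest =>
      if PySem.List.slice answer (some i) (some ((pat.length : Int) + i)) = pat then 1
      else aScan answer pat rest

def solution (myString : String) (pat : String) : Int :=
  let answer := myString.toList.foldl
    (fun acc x => if x = 'A' then acc ++ ['B'] else acc ++ ['A']) ([] : List Char)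
  aScan answer pat.toList
    (PySem.List.pyRange 0 ((answer.length : Int) - (pat.toList.length : Int) + 1) 1)

-- ===== PORT B =====
-- the mask-building loop: state (maskA, maskB, bit)
def bMaskStep (acc : Nat × Nat × Nat) (pc : Char) : Nat × Nat × Nat :=
  (if pc = 'A' then acc.1 ||| acc.2.2 else acc.1,
   if pc = 'B' then acc.2.1 ||| acc.2.2 else acc.2.1,
   acc.2.2 <<< 1)

-- the 'for c in myString:' loop, early return as recursion
def bScan (maskA maskB goal : Nat) : Nat → List Char → Int
  | _, [] => 0
  | state, c :: rest =>
      let state' := ((state <<< 1) ||| 1) &&& (if c = 'A' then maskB else maskA)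
      if state' &&& goal ≠ 0 then 1 else bScan maskA maskB goal state' rest

def solution_alt (myString : String) (pat : String) : Int :=
  let m := pat.toList.length
  if m = 0 then 1
  else
    let ms := pat.toList.foldl bMaskStep (0, 0, 1)
    bScan ms.1 ms.2.1 (1 <<< (m - 1)) 0 myString.toList

-- ===== PRECONDITION & SPEC =====
def Spec_solution (myString : String) (pat : String) (out : Int) : Prop := out = solution_alt myString pat
instance (myString : String) (pat : String) (out : Int) : Decidable (Spec_solution myString pat out) := by unfold Spec_solution; infer_instance

-- ===== CLAIM (what is proved, stated in full; the proofs are below) =====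
def Claim_equal_solution : Prop := ∀ (myString : String) (pat : String), Dom_solution myString pat → Spec_solution myString pat (solution myString pat)

-- ===== LEMMAS AND PROOFS =====

-- the character swap both programs perform
def pvFlip (c : Char) : Char := if c = 'A' then 'B' else 'A'

-- A's character loop builds exactly the mapped string
lemma foldl_swap (xs : List Char) (acc : List Char) :
    xs.foldl (fun acc x => if x = 'A' then acc ++ ['B'] else acc ++ ['A']) acc
      = acc ++ xs.map pvFlip := by
  induction xs generalizing acc with
  | nil => simp
  | cons x xs ih => by_cases h : x = 'A' <;> simp [h, ih, pvFlip]

lemma aScan_eq (ans p : List Char) (is : List Int) :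
    aScan ans p is =
      if ∃ i ∈ is, PySem.List.slice ans (some i) (some ((p.length : Int) + i)) = p then 1 else 0 := by
  induction is with
  | nil => simp [aScan]
  | cons i rest ih =>
      by_cases h : PySem.List.slice ans (some i) (some ((p.length : Int) + i)) = p
      · simp [aScan, h]
      · simp [aScan, h, ih]

-- the slice scan over the range finds exactly the infix occurrences
lemma scan_iff (ans p : List Char) :
    (∃ i ∈ PySem.List.pyRange 0 ((ans.length : Int) - (p.length : Int) + 1) 1,
        PySem.List.slice ans (some i) (some ((p.length : Int) + i)) = p)
      ↔ p <:+: ans := by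
  rw [← PySem.Chars.isIn_iff_infix, ← PySem.Chars.exists_prefix_drop_iff_isIn]
  constructor
  · rintro ⟨i, hmem, hsl⟩
    rw [PySem.List.mem_pyRange_one] at hmem
    obtain ⟨k, rfl⟩ := Int.eq_ofNat_of_zero_le hmem.1
    rw [show ((p.length : Int) + (k : Int)) = ((k : Int) + (p.length : Int)) from by ring,
      PySem.List.slice_natCast_add] at hsl
    exact ⟨k, List.prefix_iff_eq_take.2 (by simpa using hsl.symm)⟩
  · rintro ⟨j, hp⟩
    have hlen : p.length ≤ ans.length - j := by simpa using hp.length_le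
    by_cases hj : j ≤ ans.length
    · refine ⟨(j : Int), ?_, ?_⟩
      · rw [PySem.List.mem_pyRange_one]; constructor
        · exact_mod_cast Int.natCast_nonneg j
        · omega
      · rw [show ((p.length : Int) + (j : Int)) = ((j : Int) + (p.length : Int)) from by ring,
          PySem.List.slice_natCast_add]
        exact ((List.prefix_iff_eq_take.1 hp).symm)
    · have hp0 : p.length = 0 := by omega
      have hpnil : p = [] := List.eq_nil_of_length_eq_zero hp0
      refine ⟨(0 : Int), ?_, ?_⟩
      · rw [PySem.List.mem_pyRange_one]; constructor
        · exact le_refl 0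
        · rw [hp0]; omega
      · rw [hpnil]
        simpa using (PySem.List.slice_natCast_add (xs := ans) (j := 0) (n := 0))

-- bit j of the mask fold: exactly the positions of 'A' (resp. 'B') in pat
lemma mask_fold_bit (p : List Char) (a b : Nat) (k j : Nat) :
    ((p.foldl bMaskStep (a, b, 2 ^ k)).1.testBit j
        = (a.testBit j || decide (k ≤ j ∧ p[j - k]? = some 'A')))
    ∧ ((p.foldl bMaskStep (a, b, 2 ^ k)).2.1.testBit j
        = (b.testBit j || decide (k ≤ j ∧ p[j - k]? = some 'B'))) := by
  induction p generalizing a b k with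
  | nil => simp
  | cons pc p ih =>
      have hshift : (2 ^ k) <<< 1 = 2 ^ (k + 1) := by
        rw [Nat.shiftLeft_eq]; ring
      have step : (pc :: p).foldl bMaskStep (a, b, 2 ^ k)
          = p.foldl bMaskStep
              ((if pc = 'A' then a ||| 2 ^ k else a),
               (if pc = 'B' then b ||| 2 ^ k else b), 2 ^ (k + 1)) := by
        simp [bMaskStep, hshift]
      rw [step]
      obtain ⟨ihA, ihB⟩ := ih (if pc = 'A' then a ||| 2 ^ k else a)
        (if pc = 'B' then b ||| 2 ^ k else b) (k + 1)
      rw [ihA, ihB]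
      by_cases hk : k ≤ j
      · by_cases hj : j = k
        · subst hj
          have hk1 : ¬ (j + 1 ≤ j) := by omega
          constructor
          · by_cases hpc : pc = 'A' <;>
              simp [hpc, Nat.testBit_or, hk1]
          · by_cases hpc : pc = 'B' <;>
              simp [hpc, Nat.testBit_or, hk1]
        · have hk1 : k + 1 ≤ j := by omega
          have hkj : ¬ (k = j) := by omega
          have hidx : (pc :: p)[j - k]? = p[j - (k + 1)]? := by
            have hh : j - k = (j - (k + 1)) + 1 := by omega
            simp [hh]
          constructor
          · rw [hidx]
            by_cases hpc : pc = 'A' <;>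
              simp [hpc, Nat.testBit_or, hk, hk1, hkj]
          · rw [hidx]
            by_cases hpc : pc = 'B' <;>
              simp [hpc, Nat.testBit_or, hk, hk1, hkj]
      · have hk1 : ¬ (k + 1 ≤ j) := by omega
        have hkj : ¬ (k = j) := by omega
        constructor
        · by_cases hpc : pc = 'A' <;>
            simp [hpc, Nat.testBit_or, hk, hk1, hkj]
        · by_cases hpc : pc = 'B' <;>
            simp [hpc, Nat.testBit_or, hk, hk1, hkj]

-- a nonempty suffix against an appended character
lemma suffix_concat_concat (q U : List Char) (x t : Char) :
    q ++ [x] <:+ U ++ [t] ↔ x = t ∧ q <:+ U := by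
  rw [← List.reverse_prefix, ← List.reverse_prefix (l₁ := q)]
  simp [List.cons_prefix_cons]

-- take (j+1) of p splits off p[j]
lemma take_succ_concat (p : List Char) (j : Nat) (h : j < p.length) :
    p.take (j + 1) = p.take j ++ [p[j]] := by
  rw [List.take_add_one]
  simp [List.getElem?_eq_getElem h]

-- the bitap state transition preserves the suffix invariant
lemma bscan_invariant_step (p : List Char) (maskA maskB : Nat)
    (hA : ∀ j, maskA.testBit j = decide (p[j]? = some 'A'))
    (hB : ∀ j, maskB.testBit j = decide (p[j]? = some 'B'))
    (state : Nat) (u : List Char)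
    (hinv : ∀ j, state.testBit j
        = (decide (j < p.length) && decide (p.take (j + 1) <:+ u.map pvFlip)))
    (c : Char) (j : Nat) :
    (((state <<< 1) ||| 1) &&& (if c = 'A' then maskB else maskA)).testBit j
      = (decide (j < p.length) && decide (p.take (j + 1) <:+ (u ++ [c]).map pvFlip)) := by
  have h1 : (1 : Nat).testBit j = decide (0 = j) := by
    have h2 : ((2 : Nat) ^ 0).testBit j = decide (0 = j) := Nat.testBit_two_pow ..
    simpa using h2
  rw [Nat.testBit_and, Nat.testBit_or, Nat.testBit_shiftLeft, h1]
  have hmask : (if c = 'A' then maskB else maskA).testBit j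
      = decide (p[j]? = some (pvFlip c)) := by
    by_cases hc : c = 'A' <;> simp [hc, pvFlip, hA, hB]
  rw [hmask]
  have hmapp : (u ++ [c]).map pvFlip = u.map pvFlip ++ [pvFlip c] := by simp
  rw [hmapp]
  by_cases hjm : j < p.length
  · have htake : p.take (j + 1) = p.take j ++ [p[j]] := take_succ_concat p j hjm
    have hsfx : p.take (j + 1) <:+ u.map pvFlip ++ [pvFlip c]
        ↔ p[j] = pvFlip c ∧ p.take j <:+ u.map pvFlip := by
      rw [htake]; exact suffix_concat_concat _ _ _ _
    have hget : (p[j]? = some (pvFlip c)) ↔ p[j] = pvFlip c := by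
      simp [List.getElem?_eq_getElem hjm]
    rw [hinv (j - 1), Bool.eq_iff_iff]
    simp only [Bool.and_eq_true, Bool.or_eq_true, decide_eq_true_eq, hsfx, hget]
    constructor
    · rintro ⟨hor, hpj⟩
      refine ⟨hjm, hpj, ?_⟩
      rcases hor with ⟨h1j, _, hbit⟩ | h0
      · have hh : j - 1 + 1 = j := by omega
        rwa [hh] at hbit
      · have hh : j = 0 := by omega
        rw [hh]
        simp
    · rintro ⟨_, hpj, htk⟩
      refine ⟨?_, hpj⟩
      rcases Nat.eq_zero_or_pos j with h0 | hpos
      · right; omega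
      · left
        refine ⟨hpos, by omega, ?_⟩
        have hh : j - 1 + 1 = j := by omega
        rwa [hh]
  · have hnone : p[j]? = none := by
      rw [List.getElem?_eq_none_iff]; omega
    simp [hjm]

-- the scan loop returns 1 exactly when some processed prefix ends an occurrence
lemma bscan_eq (p : List Char) (hm : p ≠ []) (maskA maskB : Nat)
    (hA : ∀ j, maskA.testBit j = decide (p[j]? = some 'A'))
    (hB : ∀ j, maskB.testBit j = decide (p[j]? = some 'B'))
    (rest : List Char) :
    ∀ (u : List Char) (state : Nat),
    (∀ j, state.testBit j
        = (decide (j < p.length) && decide (p.take (j + 1) <:+ u.map pvFlip))) →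
    bScan maskA maskB (1 <<< (p.length - 1)) state rest
      = if ∃ n ∈ List.range' 1 rest.length, p <:+ ((u ++ rest.take n).map pvFlip)
        then 1 else 0 := by
  induction rest with
  | nil =>
      intro u state _
      simp [bScan]
  | cons c rest ih =>
      intro u state hinv
      have hstep := bscan_invariant_step p maskA maskB hA hB state u hinv c
      have hlen1 : p.length - 1 < p.length := by
        cases p with
        | nil => exact absurd rfl hm
        | cons x xs => simp
      have hgoal : ((((state <<< 1) ||| 1) &&& (if c = 'A' then maskB else maskA))
            &&& (1 <<< (p.length - 1)) ≠ 0)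
          ↔ p <:+ u.map pvFlip ++ [pvFlip c] := by
        rw [Nat.one_shiftLeft, Nat.and_two_pow, hstep]
        have htake : p.take ((p.length - 1) + 1) = p := by
          apply List.take_of_length_le; omega
        rw [htake]
        simp only [List.map_append, List.map_cons, List.map_nil]
        by_cases hsfx : p <:+ u.map pvFlip ++ [pvFlip c]
        · simp [hsfx, hlen1]
        · simp [hsfx]
      simp only [bScan]
      by_cases hfound : p <:+ u.map pvFlip ++ [pvFlip c]
      · rw [if_pos (hgoal.2 hfound), if_pos ?_]
        refine ⟨1, ?_, ?_⟩
        · rw [List.mem_range'_1]; simp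
        · simpa using hfound
      · rw [if_neg (fun h => hfound (hgoal.1 h)), ih (u ++ [c]) _ hstep]
        congr 1
        apply propext
        constructor
        · rintro ⟨n, hmem, hsfx⟩
          rw [List.mem_range'_1] at hmem
          refine ⟨n + 1, ?_, ?_⟩
          · rw [List.mem_range'_1]; simp; omega
          · simpa [List.take_succ_cons] using hsfx
        · rintro ⟨n, hmem, hsfx⟩
          rw [List.mem_range'_1] at hmem
          simp only [List.length_cons] at hmem
          match n, hmem with
          | 1, _ =>
              exact absurd (by simpa using hsfx) hfound
          | (n' + 2), hmem =>
              refine ⟨n' + 1, ?_, ?_⟩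
              · rw [List.mem_range'_1]; omega
              · simpa [List.take_succ_cons] using hsfx

-- an infix occurrence is a suffix of some nonempty prefix (p nonempty)
lemma infix_iff_suffix_take (p F : List Char) (hp : p ≠ []) :
    p <:+: F ↔ ∃ n, 1 ≤ n ∧ n ≤ F.length ∧ p <:+ F.take n := by
  constructor
  · rintro ⟨u, v, rfl⟩
    refine ⟨u.length + p.length, ?_, by simp [List.length_append], ?_⟩
    · have hlp : p.length ≠ 0 := by simpa using hp
      omega
    · have htk : (u ++ p ++ v).take (u.length + p.length) = u ++ p := by
        rw [List.take_append, List.take_of_length_le (by simp)]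
        simp
      rw [htk]
      exact List.suffix_append u p
  · rintro ⟨n, _, _, hsfx⟩
    exact hsfx.isInfix.trans (List.take_prefix n F).isInfix

-- ===== VERDICT (by name: the statement is the Claim_ definition above) =====
theorem solution_spec : Claim_equal_solution := by
  intro myString pat _
  unfold Spec_solution solution solution_alt
  rw [foldl_swap, aScan_eq, List.nil_append]
  set s := myString.toList with hs
  set p := pat.toList with hp
  set F := s.map pvFlip with hF
  by_cases hm : p.length = 0
  · have hpnil : p = [] := List.eq_nil_of_length_eq_zero hm
    rw [if_pos hm, if_pos ?_]
    rw [(scan_iff F p), hpnil]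
    exact List.nil_infix
  · rw [if_neg hm]
    have hpne : p ≠ [] := by
      intro h; exact hm (by rw [h]; rfl)
    have hA : ∀ j, (p.foldl bMaskStep (0, 0, 1)).1.testBit j
        = decide (p[j]? = some 'A') := by
      intro j
      have h := (mask_fold_bit p 0 0 0 j).1
      simp only [pow_zero, Nat.zero_testBit, Bool.false_or, Nat.sub_zero, Nat.zero_le,
        true_and] at h
      exact h
    have hB : ∀ j, (p.foldl bMaskStep (0, 0, 1)).2.1.testBit j
        = decide (p[j]? = some 'B') := by
      intro j
      have h := (mask_fold_bit p 0 0 0 j).2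
      simp only [pow_zero, Nat.zero_testBit, Bool.false_or, Nat.sub_zero, Nat.zero_le,
        true_and] at h
      exact h
    rw [bscan_eq p hpne _ _ hA hB s [] 0 (by simp; exact fun j _ => hpne)]
    have hiff : (∃ i ∈ PySem.List.pyRange 0 ((F.length : Int) - (p.length : Int) + 1) 1,
          PySem.List.slice F (some i) (some ((p.length : Int) + i)) = p)
        ↔ ∃ n ∈ List.range' 1 s.length, p <:+ (([] ++ s.take n).map pvFlip) := by
      rw [scan_iff F p, infix_iff_suffix_take p F hpne]
      constructor
      · rintro ⟨n, h1, h2, h3⟩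
        refine ⟨n, ?_, ?_⟩
        · rw [List.mem_range'_1]
          have : F.length = s.length := by simp [hF]
          omega
        · simpa [hF, List.map_take] using h3
      · rintro ⟨n, hmem, h3⟩
        rw [List.mem_range'_1] at hmem
        refine ⟨n, hmem.1, by simp [hF]; omega, ?_⟩
        simpa [hF, List.map_take] using h3
    by_cases hocc : ∃ n ∈ List.range' 1 s.length, p <:+ (([] ++ s.take n).map pvFlip)
    · rw [if_pos (hiff.2 hocc), if_pos hocc]
    · rw [if_neg (fun h => hocc (hiff.1 h)), if_neg hocc]
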